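-- pv_equiv track=rewrite | github.com/bnganyi/kentender_v1 | kentender_procurement/kentender_procurement/tender_management/services/works_tender_hardening_validation.py | _status_from_findings
-- ===== SOURCE A (Python) =====
-- from typing import Any, Callable
--
-- HARDENING_STATUS_PASS = "Pass"
--
-- HARDENING_STATUS_WARNING = "Warning"
--
-- HARDENING_STATUS_BLOCKED = "Blocked"
--
-- SEVERITY_CRITICAL = "Critical"
--
-- SEVERITY_INFO = "Info"
--
-- def _status_from_findings(findings: list[dict[str, Any]]) -> str:
-- 	if not findings:
-- 		return HARDENING_STATUS_PASS
-- 	if any(f.get("severity") == SEVERITY_CRITICAL for f in findings):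
-- 		return HARDENING_STATUS_BLOCKED
-- 	if any(f.get("severity") != SEVERITY_INFO for f in findings):
-- 		return HARDENING_STATUS_WARNING
-- 	return HARDENING_STATUS_PASS
-- ===== SOURCE B (Python) =====
-- HARDENING_STATUS_PASS = "Pass"
-- HARDENING_STATUS_WARNING = "Warning"
-- HARDENING_STATUS_BLOCKED = "Blocked"
-- SEVERITY_CRITICAL = "Critical"
-- SEVERITY_INFO = "Info"
--
-- def _status_from_findings(findings):
--     has_non_info = False
--     for f in findings:
--         sev = f.get("severity")
--         if sev == SEVERITY_CRITICAL:
--             return HARDENING_STATUS_BLOCKED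
--         if sev != SEVERITY_INFO:
--             has_non_info = True
--     return HARDENING_STATUS_WARNING if has_non_info else HARDENING_STATUS_PASS
-- ===== Notes on version B (the rewrite author's own statement) =====
-- stated objective: simpler
-- what changed: Replaces the empty-check plus two separate any() scans with one single pass that returns Blocked on the first Critical and carries a has_non_info flag, Warning/Pass decided after the loop.
import Mathlib
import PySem

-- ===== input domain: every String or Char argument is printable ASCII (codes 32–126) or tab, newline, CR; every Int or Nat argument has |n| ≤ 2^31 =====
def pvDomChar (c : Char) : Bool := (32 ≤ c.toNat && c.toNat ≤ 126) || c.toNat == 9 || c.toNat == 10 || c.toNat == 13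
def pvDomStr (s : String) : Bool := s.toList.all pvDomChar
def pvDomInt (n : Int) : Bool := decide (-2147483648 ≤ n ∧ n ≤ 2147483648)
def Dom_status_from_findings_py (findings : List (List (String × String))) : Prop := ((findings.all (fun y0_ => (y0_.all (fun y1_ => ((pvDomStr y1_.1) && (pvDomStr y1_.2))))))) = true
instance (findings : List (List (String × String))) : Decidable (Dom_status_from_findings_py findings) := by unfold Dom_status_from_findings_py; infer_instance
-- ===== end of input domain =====

-- B: one single pass with a has_non_info flag instead of an empty-check plus two any() scans (simpler decomposition).

-- f.get("severity"): first match in the association list (none = missing key)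
def pvSev (f : List (String × String)) : Option String :=
  (f.find? (fun p => p.1 == "severity")).map (·.2)

-- ===== PORT A =====
def status_from_findings_py (findings : List (List (String × String))) : String :=
  if findings = [] then "Pass"
  else if findings.any (fun f => pvSev f == some "Critical") then "Blocked"
  else if findings.any (fun f => pvSev f != some "Info") then "Warning"
  else "Pass"

-- ===== PORT B =====
def pvAltLoop : List (List (String × String)) → Bool → String
  | [], flag => if flag then "Warning" else "Pass"
  | f :: rest, flag =>
    let sev := pvSev f
    if sev == some "Critical" then "Blocked"
    else pvAltLoop rest (flag || sev != some "Info")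

def status_from_findings_py_alt (findings : List (List (String × String))) : String :=
  pvAltLoop findings false

-- ===== PRECONDITION & SPEC =====
def Spec_status_from_findings_py (findings : List (List (String × String))) (out : String) : Prop := out = status_from_findings_py_alt findings
instance (findings : List (List (String × String))) (out : String) : Decidable (Spec_status_from_findings_py findings out) := by unfold Spec_status_from_findings_py; infer_instance

-- ===== CLAIM (what is proved, stated in full; the proofs are below) =====
def Claim_equal_status_from_findings_py : Prop := ∀ (findings : List (List (String × String))), Dom_status_from_findings_py findings → Spec_status_from_findings_py findings (status_from_findings_py findings)

-- ===== LEMMAS AND PROOFS =====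

-- ===== VERDICT (by name: the statement is the Claim_ definition above) =====
lemma pvAltLoop_eq (fs : List (List (String × String))) (flag : Bool) :
    pvAltLoop fs flag =
      if fs.any (fun f => pvSev f == some "Critical") then "Blocked"
      else if flag || fs.any (fun f => pvSev f != some "Info") then "Warning"
      else "Pass" := by
  induction fs generalizing flag with
  | nil => simp [pvAltLoop]
  | cons f rest ih =>
    simp only [pvAltLoop, List.any_cons]
    by_cases hc : (pvSev f == some "Critical") = true
    · simp [hc]
    · simp only [Bool.not_eq_true] at hc
      simp [hc, ih, Bool.or_assoc]

theorem status_from_findings_py_spec : Claim_equal_status_from_findings_py := by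
  intro findings _
  unfold Spec_status_from_findings_py status_from_findings_py status_from_findings_py_alt
  rw [pvAltLoop_eq]
  cases findings <;> simp
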